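-- pv_equiv track=rewrite | github.com/Yug-gurnani/DSA-Questions | Dynamic Programming/Kadane/Max difference in two non overlapping subarray.py | rightmax
-- ===== SOURCE A (Python) =====
-- def rightmax(arr,n,right):
--     lmax = arr[n-1]
--     gmax = arr[n-1]
--     right[n-1] = arr[n-1]
--     for i in range(n-2,-1,-1):
--         lmax = max(arr[i],lmax + arr[i])
--         gmax = max(lmax,gmax)
--         right[i] = gmax
--     return gmax
-- ===== SOURCE B (Python) =====
-- def rightmax(arr, n, right):
--     # Prefix-sum formulation instead of Kadane: best subarray starting at i is
--     # (max of prefix sums S[j] for j > i) - S[i]; a prefix-sum table is built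
--     # first, then one scan keeps a running maximum of prefix sums. Mutates
--     # right[0:n] exactly as A does.
--     S = [0]
--     for i in range(n):
--         S.append(S[-1] + arr[i])
--     maxS = S[n]
--     best = arr[n - 1]
--     right[n - 1] = best
--     for i in range(n - 2, -1, -1):
--         maxS = max(maxS, S[i + 1])
--         best = max(best, maxS - S[i])
--         right[i] = best
--     return best
-- ===== Notes on version B (the rewrite author's own statement) =====
-- stated objective: alternative
-- what changed: Replaces Kadane's local recurrence lmax=max(arr[i], lmax+arr[i]) with the prefix-sum formulation: a prefix-sum table S is built first, then the best subarray starting at i is computed as (running maximum of S[j] for j>i) - S[i].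
-- outside the precondition, e.g. on rightmax([2, 3, 1], -2, [0, 0, 0]): A returns 2, B raises IndexError
import Mathlib
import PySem

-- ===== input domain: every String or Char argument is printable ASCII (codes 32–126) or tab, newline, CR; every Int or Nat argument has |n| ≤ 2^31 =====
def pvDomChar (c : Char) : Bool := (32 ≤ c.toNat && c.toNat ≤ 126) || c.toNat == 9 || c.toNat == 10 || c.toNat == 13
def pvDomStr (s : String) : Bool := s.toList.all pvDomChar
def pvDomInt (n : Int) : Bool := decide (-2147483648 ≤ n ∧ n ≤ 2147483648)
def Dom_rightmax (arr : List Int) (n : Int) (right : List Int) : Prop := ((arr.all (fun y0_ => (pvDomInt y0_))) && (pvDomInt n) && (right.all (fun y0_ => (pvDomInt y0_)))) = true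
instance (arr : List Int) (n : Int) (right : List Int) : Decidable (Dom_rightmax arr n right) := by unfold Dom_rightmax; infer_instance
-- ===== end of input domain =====

-- B replaces A's Kadane recurrence by the prefix-sum formulation (a prefix-sum
-- table plus a running maximum of prefix sums); same cost, different algorithm.
-- Both Pythons write the same values to right[0:n] inside Pre_; the equivalence
-- proved here is about the RETURN value only.

-- ===== PORT A =====
def rightmax (arr : List Int) (n : Int) (right : List Int) : Int :=
  let lmax := PySem.List.pyGetD arr (n - 1) 0
  let gmax := PySem.List.pyGetD arr (n - 1) 0
  -- the writes to `right` do not affect the return value and are not modelled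
  let s := (PySem.List.pyRange (n - 2) (-1) (-1)).foldl
    (fun (p : Int × Int) i =>
      let ai := PySem.List.pyGetD arr i 0
      let l := max ai (p.1 + ai)
      let g := max l p.2
      (l, g)) (lmax, gmax)
  s.2

-- ===== PORT B =====
def rightmax_alt (arr : List Int) (n : Int) (right : List Int) : Int :=
  let S := (PySem.List.pyRange 0 n 1).foldl
    (fun S i => S ++ [S.getLastD 0 + PySem.List.pyGetD arr i 0]) [0]
  let maxS := PySem.List.pyGetD S n 0
  let best := PySem.List.pyGetD arr (n - 1) 0
  -- the writes to `right` do not affect the return value and are not modelled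
  let p := (PySem.List.pyRange (n - 2) (-1) (-1)).foldl
    (fun (p : Int × Int) i =>
      let ms := max p.1 (PySem.List.pyGetD S (i + 1) 0)
      (ms, max p.2 (ms - PySem.List.pyGetD S i 0))) (maxS, best)
  p.2

-- ===== PRECONDITION & SPEC =====
-- Pre_ excludes inputs where A raises (n > len(arr), n > len(right), or an
-- n ≤ 0 whose wrapped index n-1 falls outside arr or right) and the n ≤ -2
-- inputs where A returns arr[n-1] only by Python's negative-index wraparound,
-- an accident of A's implementation on which B raises IndexError (S[n] on the
-- one-element table); the wraparound inputs n ∈ {-1, 0}, where B returns and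
-- agrees with A, stay inside Pre_.
def Pre_rightmax (arr : List Int) (n : Int) (right : List Int) : Prop :=
  (1 ≤ n ∧ n ≤ (arr.length : Int) ∧ n ≤ (right.length : Int)) ∨
    (-1 ≤ n ∧ n ≤ 0 ∧ 1 - n ≤ (arr.length : Int) ∧ 1 - n ≤ (right.length : Int))
instance (arr : List Int) (n : Int) (right : List Int) : Decidable (Pre_rightmax arr n right) := by
  unfold Pre_rightmax; infer_instance

def pvWitness_rightmax : List Int × Int × List Int := ([1, -2, 3], 3, [0, 0, 0])

def Spec_rightmax (arr : List Int) (n : Int) (right : List Int) (out : Int) : Prop := out = rightmax_alt arr n right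
instance (arr : List Int) (n : Int) (right : List Int) (out : Int) : Decidable (Spec_rightmax arr n right out) := by unfold Spec_rightmax; infer_instance

-- ===== CLAIM (what is proved, stated in full; the proofs are below) =====
def Claim_equal_rightmax : Prop := ∀ (arr : List Int) (n : Int) (right : List Int), Dom_rightmax arr n right → Pre_rightmax arr n right → Spec_rightmax arr n right (rightmax arr n right)

-- ===== LEMMAS AND PROOFS =====

-- maximum possibly-empty prefix sum
def pvG : List Int → Int
  | [] => 0
  | x :: t => max 0 (x + pvG t)

-- maximum nonempty prefix sum (0 on [])
def pvSB : List Int → Int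
  | [] => 0
  | x :: t => x + pvG t

-- maximum nonempty-subarray sum (0 on [])
def pvBC : List Int → Int
  | [] => 0
  | [x] => x
  | x :: y :: t => max (x + pvG (y :: t)) (pvBC (y :: t))

-- prefix-sum table: pvPS l = [sum of l.take j for j = 0..len]
def pvPS (l : List Int) : List Int :=
  (List.range (l.length + 1)).map (fun j => (l.take j).sum)

lemma pvG_nonempty (l : List Int) (h : l ≠ []) : pvG l = max 0 (pvSB l) := by
  cases l with
  | nil => exact absurd rfl h
  | cons x t => simp [pvG, pvSB]

lemma pvBC_cons (x : Int) (t : List Int) (h : t ≠ []) :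
    pvBC (x :: t) = max (x + pvG t) (pvBC t) := by
  cases t with
  | nil => exact absurd rfl h
  | cons y r => simp [pvBC]

-- A's fused Kadane pass, as a foldr over the leading elements
lemma foldrA (t : List Int) (y : Int) :
    t.foldr (fun x (p : Int × Int) => (max x (p.1 + x), max (max x (p.1 + x)) p.2)) (y, y)
      = (pvSB (t ++ [y]), pvBC (t ++ [y])) := by
  induction t with
  | nil => simp [pvSB, pvBC, pvG]
  | cons x t ih =>
    rw [List.foldr_cons, ih, List.cons_append]
    have hne : t ++ [y] ≠ [] := by simp
    have hsb : pvSB (x :: (t ++ [y])) = x + pvG (t ++ [y]) := rfl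
    rw [pvBC_cons x (t ++ [y]) hne, hsb]
    have hg := pvG_nonempty (t ++ [y]) hne
    simp only [Prod.mk.injEq]
    constructor
    · omega
    · congr 1; omega

lemma pvPS_getD (l : List Int) (j : Nat) (h : j ≤ l.length) :
    (pvPS l).getD j 0 = (l.take j).sum := by
  simp [pvPS, List.getD_eq_getElem?_getD, Nat.lt_succ_of_le h]

lemma pvPS_getLastD (l : List Int) : (pvPS l).getLastD 0 = l.sum := by
  rw [pvPS, List.range_succ, List.map_append]
  simp

lemma pvPS_snoc (l : List Int) (x : Int) : pvPS (l ++ [x]) = pvPS l ++ [l.sum + x] := by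
  rw [pvPS, pvPS]
  have hlen : (l ++ [x]).length + 1 = (l.length + 1) + 1 := by simp
  rw [hlen, List.range_succ, List.map_append]
  congr 1
  · apply List.map_congr_left
    intro j hj
    rw [List.mem_range] at hj
    rw [List.take_append_of_le_length (by omega)]
  · simp

lemma take_snoc (arr : List Int) (k : Nat) (h : k < arr.length) :
    arr.take k ++ [arr[k]] = arr.take (k + 1) := by
  rw [List.take_add_one, List.getElem?_eq_getElem h]
  rfl

lemma S_build (arr : List Int) :
    ∀ k : Nat, k ≤ arr.length →
      (PySem.List.pyRange 0 (k : Int) 1).foldl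
        (fun S i => S ++ [S.getLastD 0 + PySem.List.pyGetD arr i 0]) [0]
        = pvPS (arr.take k) := by
  intro k
  induction k with
  | zero => intro _; simp [PySem.List.pyRange_one_eq_nil, pvPS]
  | succ k ih =>
    intro h
    have hcast : ((k + 1 : Nat) : Int) = (k : Int) + 1 := by push_cast; ring
    rw [hcast, PySem.List.pyRange_one_succ_right (by omega : (0:Int) ≤ (k:Int)),
        List.foldl_append, ih (by omega)]
    have hk : k < arr.length := by omega
    simp only [List.foldl_cons, List.foldl_nil, PySem.List.pyGetD_natCast]
    rw [pvPS_getLastD, List.getD_eq_getElem arr 0 hk, ← take_snoc arr k hk, pvPS_snoc]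

-- B's scan, as a foldr: invariant of the prefix-sum running-maximum pass
lemma invB (a S : List Int)
    (hS : ∀ j : Nat, j ≤ a.length → PySem.List.pyGetD S (j : Int) 0 = (a.take j).sum) :
    ∀ (d k : Nat), k + d + 1 = a.length →
      (PySem.List.pyRange (k : Int) ((a.length : Int) - 1) 1).foldr
        (fun i (p : Int × Int) =>
          let ms := max p.1 (PySem.List.pyGetD S (i + 1) 0)
          (ms, max p.2 (ms - PySem.List.pyGetD S i 0)))
        (a.sum, a.getD (a.length - 1) 0)
      = ((a.take k).sum + pvSB (a.drop k), pvBC (a.drop k)) := by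
  intro d
  induction d with
  | zero =>
    intro k hk
    have hk1 : k < a.length := by omega
    rw [PySem.List.pyRange_one_eq_nil (by omega : (a.length : Int) - 1 ≤ (k : Int))]
    rw [List.foldr_nil]
    have hdrop : a.drop k = [a[k]] := by
      rw [List.drop_eq_getElem_cons hk1]
      simp [List.drop_eq_nil_of_le, hk]
    have hsum : a.sum = (a.take k).sum + a[k] := by
      conv_lhs => rw [← List.take_append_drop k a]
      rw [List.sum_append, hdrop]; simp
    have hgd : a.getD (a.length - 1) 0 = a[k] := by
      rw [List.getD_eq_getElem a 0 (by omega : a.length - 1 < a.length)]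
      congr 1; omega
    rw [hdrop, hgd, hsum]
    simp [pvSB, pvBC, pvG]
  | succ d ih =>
    intro k hk
    have hk1 : k + 1 < a.length := by omega
    have hkk : k < a.length := by omega
    rw [PySem.List.pyRange_one_cons (by omega : (k : Int) < (a.length : Int) - 1)]
    rw [List.foldr_cons]
    have hcast : (k : Int) + 1 = ((k + 1 : Nat) : Int) := by push_cast; ring
    rw [hcast, ih (k + 1) (by omega)]
    simp only [hS (k + 1) (by omega), hS k (by omega)]
    have hdrop : a.drop k = a[k] :: a.drop (k + 1) := List.drop_eq_getElem_cons hkk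
    have htake : (a.take (k + 1)).sum = (a.take k).sum + a[k] := by
      rw [← take_snoc a k hkk, List.sum_append, List.sum_cons, List.sum_nil, add_zero]
    have hne : a.drop (k + 1) ≠ [] := by
      simp only [ne_eq, List.drop_eq_nil_iff]; omega
    have hg := pvG_nonempty (a.drop (k + 1)) hne
    rw [hdrop, pvBC_cons a[k] (a.drop (k + 1)) hne]
    have hsb : pvSB (a[k] :: a.drop (k + 1)) = a[k] + pvG (a.drop (k + 1)) := rfl
    rw [hsb]
    simp only [Prod.mk.injEq]
    constructor <;> omega

-- the index loop's reads are exactly the prefix of the array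
lemma map_pyGetD_range (arr : List Int) :
    ∀ (m : Nat), m ≤ arr.length →
      (PySem.List.pyRange 0 (m : Int) 1).map (fun j => PySem.List.pyGetD arr j 0)
        = arr.take m := by
  intro m
  induction m with
  | zero => intro _; simp [PySem.List.pyRange_one_eq_nil]
  | succ k ih =>
    intro h
    have hcast : ((k + 1 : Nat) : Int) = (k : Int) + 1 := by push_cast; ring
    rw [hcast, PySem.List.pyRange_one_succ_right (by omega : (0:Int) ≤ (k:Int)),
        List.map_append, ih (by omega)]
    have hkl : k < arr.length := by omega
    simp only [List.map_cons, List.map_nil, PySem.List.pyGetD_natCast]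
    rw [List.getD_eq_getElem arr 0 hkl, take_snoc arr k hkl]

-- ===== VERDICT (by name: the statement is the Claim_ definition above) =====
theorem rightmax_spec : Claim_equal_rightmax := by
  intro arr n right _ hpre
  rcases hpre with ⟨h1, h2, _⟩ | ⟨hlo, hhi, _, _⟩
  case inr =>
    -- n = 0 or n = -1: both loops are empty and both return arr[n-1]
    have hn : n = 0 ∨ n = -1 := by omega
    unfold Spec_rightmax rightmax rightmax_alt
    rcases hn with rfl | rfl <;>
      · rw [PySem.List.pyRange_neg_one_eq_nil (by norm_num),
            PySem.List.pyRange_one_eq_nil (by norm_num)]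
        simp
  unfold Spec_rightmax rightmax rightmax_alt
  simp only []
  set m := n.toNat with hm
  have hml : m ≤ arr.length := by omega
  have hm1 : 1 ≤ m := by omega
  have hnm : ((m : Nat) : Int) = n := by omega
  have hm1lt : m - 1 < arr.length := by omega
  have hv0 : PySem.List.pyGetD arr (n - 1) 0 = arr[m - 1] := by
    rw [PySem.List.pyGetD_eq_getElem arr 0 (by omega) (by omega)]
    congr 1; omega
  have hrange : PySem.List.pyRange (n - 2) (-1) (-1)
      = (PySem.List.pyRange 0 (n - 1) 1).reverse := by
    have h' : (n - 2) + 1 = n - 1 := by ring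
    rw [PySem.List.pyRange_neg_one_eq_reverse, h']
    norm_num
  have hcast1 : ((m - 1 : Nat) : Int) = n - 1 := by omega
  have hmapA : (PySem.List.pyRange 0 (n - 1) 1).map (fun j => PySem.List.pyGetD arr j 0)
      = arr.take (m - 1) := by
    rw [← hcast1]; exact map_pyGetD_range arr (m - 1) (by omega)
  have htakem : arr.take (m - 1) ++ [arr[m - 1]] = arr.take m := by
    rw [take_snoc arr (m - 1) hm1lt]; congr 1; omega
  -- the A side: the fused pass is a foldr over the prefix's leading elements
  have hA : (PySem.List.pyRange (n - 2) (-1) (-1)).foldl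
      (fun (p : Int × Int) i =>
        let ai := PySem.List.pyGetD arr i 0
        let l := max ai (p.1 + ai)
        let g := max l p.2
        (l, g)) (PySem.List.pyGetD arr (n - 1) 0, PySem.List.pyGetD arr (n - 1) 0)
      = ((arr.take (m - 1)).reverse).foldl
          (fun (p : Int × Int) x => (max x (p.1 + x), max (max x (p.1 + x)) p.2))
          (arr[m - 1], arr[m - 1]) := by
    rw [hrange, hv0, ← hmapA, ← List.map_reverse, List.foldl_map]
  rw [hA, List.foldl_reverse, foldrA, htakem]
  -- the B side
  set a := arr.take m with ha
  have hlena : a.length = m := by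
    rw [ha, List.length_take]; omega
  have hSbuild : (PySem.List.pyRange 0 n 1).foldl
      (fun S i => S ++ [S.getLastD 0 + PySem.List.pyGetD arr i 0]) [0] = pvPS a := by
    rw [← hnm]; exact S_build arr m hml
  rw [hSbuild]
  have hSread : ∀ j : Nat, j ≤ a.length →
      PySem.List.pyGetD (pvPS a) (j : Int) 0 = (a.take j).sum := by
    intro j hj
    rw [PySem.List.pyGetD_natCast]
    exact pvPS_getD a j hj
  have hmaxS : PySem.List.pyGetD (pvPS a) n 0 = a.sum := by
    rw [← hnm, hSread m (by omega), List.take_of_length_le (by omega)]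
  have hbest : PySem.List.pyGetD arr (n - 1) 0 = a.getD (a.length - 1) 0 := by
    rw [hv0, hlena, List.getD_eq_getElem?_getD, ha,
        List.getElem?_take_of_lt (by omega : m - 1 < m), List.getElem?_eq_getElem hm1lt]
    rfl
  rw [hmaxS, hbest, hrange, List.foldl_reverse]
  have hlen1 : ((a.length : Nat) : Int) - 1 = n - 1 := by omega
  have hB := invB a (pvPS a) hSread (m - 1) 0 (by omega)
  simp only [Nat.cast_zero] at hB
  rw [← hlen1, hB]
  simp
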